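-- pv_equiv track=rewrite | github.com/jneug/schule-projekte | Python/Automaten/nka_palindrom.py | scan_word
-- ===== SOURCE A (Python) =====
-- def scan_word( state, word, stack ):
--     stack_char = stack.pop(0) if stack else ""
--
--     if not word:
--         return state == 1 and stack_char == "#"
--
--     char = word[0]
--     word = word[1:]
--
--     if state == 0:
--         if stack_char == '#':
--             if char == 'a':
--                 return scan_word(0, word, ['A','#'] + stack)
--             elif char == 'b':
--                 return scan_word(0, word, ['B','#'] + stack)
--         elif stack_char == 'A':
--             if char == 'a':
--                 return scan_word(0, word, ['A','A'] + stack) or scan_word(1, word, stack)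
--             elif char == 'b':
--                 return scan_word(0, word, ['B','A'] + stack)
--         elif stack_char == 'B':
--             if char == 'a':
--                 return scan_word(0, word, ['A','B'] + stack)
--             elif char == 'b':
--                 return scan_word(0, word, ['B','B'] + stack) or scan_word(1, word, stack)
--     elif state == 1:
--         if stack_char == 'A' and char == 'a':
--             return scan_word(1, word, stack)
--         elif stack_char == 'B' and char == 'b':
--             return scan_word(1, word, stack)
--
--     # Endzustand erreicht und ggf. test, ob Keller leer,
--     # falls von der Sprache gefordert.
--     return False
-- ===== SOURCE B (Python) =====
-- def scan_word(state, word, stack):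
--     # Iterative worklist search over NPDA configurations instead of recursion.
--     # Return-value equivalent to A; unlike A, does NOT mutate the stack argument.
--     todo = [(state, word, list(stack))]
--     while todo:
--         (st, w, sk), todo = todo[0], todo[1:]
--         top = sk[0] if sk else ""
--         rest = sk[1:]
--         if not w:
--             if st == 1 and top == "#":
--                 return True
--             continue
--         c, w2 = w[0], w[1:]
--         succ = []
--         if st == 0:
--             if top == '#':
--                 if c == 'a':
--                     succ = [(0, w2, ['A', '#'] + rest)]
--                 elif c == 'b':
--                     succ = [(0, w2, ['B', '#'] + rest)]
--             elif top == 'A':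
--                 if c == 'a':
--                     succ = [(0, w2, ['A', 'A'] + rest), (1, w2, rest)]
--                 elif c == 'b':
--                     succ = [(0, w2, ['B', 'A'] + rest)]
--             elif top == 'B':
--                 if c == 'a':
--                     succ = [(0, w2, ['A', 'B'] + rest)]
--                 elif c == 'b':
--                     succ = [(0, w2, ['B', 'B'] + rest), (1, w2, rest)]
--         elif st == 1:
--             if top == 'A' and c == 'a':
--                 succ = [(1, w2, rest)]
--             elif top == 'B' and c == 'b':
--                 succ = [(1, w2, rest)]
--         todo = succ + todo
--     return False
-- ===== Notes on version B (the rewrite author's own statement) =====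
-- stated objective: alternative
-- what changed: Replaces A's short-circuit recursion over NPDA configurations by an explicit iterative worklist search over (state, word, stack) configurations; A mutates the passed stack list in place, B does not, so the equivalence concerns the return value only.
import Mathlib
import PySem

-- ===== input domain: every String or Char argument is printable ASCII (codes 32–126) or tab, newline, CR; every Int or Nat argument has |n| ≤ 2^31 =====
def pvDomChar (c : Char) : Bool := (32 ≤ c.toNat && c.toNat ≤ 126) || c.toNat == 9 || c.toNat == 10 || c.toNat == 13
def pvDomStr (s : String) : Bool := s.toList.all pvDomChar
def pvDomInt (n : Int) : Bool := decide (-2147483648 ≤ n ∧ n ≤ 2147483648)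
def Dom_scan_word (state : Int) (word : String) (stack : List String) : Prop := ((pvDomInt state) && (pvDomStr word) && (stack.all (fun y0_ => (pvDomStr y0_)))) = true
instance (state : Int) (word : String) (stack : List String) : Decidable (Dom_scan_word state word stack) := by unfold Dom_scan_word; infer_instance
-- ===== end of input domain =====

-- B replaces A's recursion by an explicit worklist search over configurations (alternative
-- decomposition, same cost). A pops elements of the passed stack list in place; B does not
-- mutate its argument, and the equivalence proved here is about the RETURN value only.

-- ===== PORT A =====
-- literal transliteration of A's recursion; the per-call `stack.pop(0) if stack else ""`
-- becomes reading the head (default "") and recursing on the tail.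
def scanGoA : Int → List Char → List String → Bool
  | state, [], stack =>
    let stack_char := stack.headD ""
    state == 1 && stack_char == "#"
  | state, char :: word, stack =>
    let stack_char := stack.headD ""
    let rest := stack.tail
    if state == 0 then
      if stack_char == "#" then
        if char == 'a' then scanGoA 0 word ("A" :: "#" :: rest)
        else if char == 'b' then scanGoA 0 word ("B" :: "#" :: rest)
        else false
      else if stack_char == "A" then
        if char == 'a' then scanGoA 0 word ("A" :: "A" :: rest) || scanGoA 1 word rest
        else if char == 'b' then scanGoA 0 word ("B" :: "A" :: rest)
        else false
      else if stack_char == "B" then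
        if char == 'a' then scanGoA 0 word ("A" :: "B" :: rest)
        else if char == 'b' then scanGoA 0 word ("B" :: "B" :: rest) || scanGoA 1 word rest
        else false
      else false
    else if state == 1 then
      if stack_char == "A" && char == 'a' then scanGoA 1 word rest
      else if stack_char == "B" && char == 'b' then scanGoA 1 word rest
      else false
    else false

def scan_word (state : Int) (word : String) (stack : List String) : Bool :=
  scanGoA state word.toList stack

-- ===== PORT B =====
-- a configuration is (state, remaining word, stack contents)
def pvSuccs : Int × List Char × List String → List (Int × List Char × List String)
  | (_, [], _) => []
  | (st, c :: w2, sk) =>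
    let top := sk.headD ""
    let rest := sk.tail
    if st == 0 then
      if top == "#" then
        if c == 'a' then [(0, w2, "A" :: "#" :: rest)]
        else if c == 'b' then [(0, w2, "B" :: "#" :: rest)]
        else []
      else if top == "A" then
        if c == 'a' then [(0, w2, "A" :: "A" :: rest), (1, w2, rest)]
        else if c == 'b' then [(0, w2, "B" :: "A" :: rest)]
        else []
      else if top == "B" then
        if c == 'a' then [(0, w2, "A" :: "B" :: rest)]
        else if c == 'b' then [(0, w2, "B" :: "B" :: rest), (1, w2, rest)]
        else []
      else []
    else if st == 1 then
      if top == "A" && c == 'a' then [(1, w2, rest)]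
      else if top == "B" && c == 'b' then [(1, w2, rest)]
      else []
    else []

def pvAccept (c : Int × List Char × List String) : Bool :=
  c.2.1 == [] && c.1 == 1 && c.2.2.headD "" == "#"

def pvMeasure (ws : List (Int × List Char × List String)) : Nat :=
  (ws.map (fun c => 3 ^ c.2.1.length)).sum

-- termination of the worklist loop: processing a configuration spends 3^|word| and the
-- successors cost at most 2 * 3^(|word|-1)
theorem pvSuccs_measure (c : Int × List Char × List String) :
    pvMeasure (pvSuccs c) < 3 ^ c.2.1.length := by
  obtain ⟨st, w, sk⟩ := c
  cases w with
  | nil => simp [pvSuccs, pvMeasure]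
  | cons ch w2 =>
    have h3 : 0 < 3 ^ w2.length := Nat.pow_pos (by norm_num)
    simp only [pvSuccs, pvMeasure]
    split_ifs <;> simp [pow_succ] <;> omega

def pvLoop : List (Int × List Char × List String) → Bool
  | [] => false
  | c :: ws => if pvAccept c then true else pvLoop (pvSuccs c ++ ws)
termination_by ws => pvMeasure ws
decreasing_by
  simp only [pvMeasure, List.map_append, List.sum_append, List.map_cons, List.sum_cons]
  have := pvSuccs_measure c
  simp only [pvMeasure] at this
  omega

def scan_word_alt (state : Int) (word : String) (stack : List String) : Bool :=
  pvLoop [(state, word.toList, stack)]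

-- ===== PRECONDITION & SPEC =====
def Spec_scan_word (state : Int) (word : String) (stack : List String) (out : Bool) : Prop := out = scan_word_alt state word stack
instance (state : Int) (word : String) (stack : List String) (out : Bool) : Decidable (Spec_scan_word state word stack out) := by unfold Spec_scan_word; infer_instance

-- ===== CLAIM (what is proved, stated in full; the proofs are below) =====
def Claim_equal_scan_word : Prop := ∀ (state : Int) (word : String) (stack : List String), Dom_scan_word state word stack → Spec_scan_word state word stack (scan_word state word stack)

-- ===== LEMMAS AND PROOFS =====

-- on an empty word A's recursion is exactly the acceptance test
theorem scanGoA_nil (st : Int) (sk : List String) :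
    scanGoA st [] sk = pvAccept (st, [], sk) := by
  simp [scanGoA, pvAccept]

-- on a nonempty word A's recursion is the disjunction over B's successor configurations
theorem scanGoA_cons (st : Int) (ch : Char) (w2 : List Char) (sk : List String) :
    scanGoA st (ch :: w2) sk =
      (pvSuccs (st, ch :: w2, sk)).any (fun c => scanGoA c.1 c.2.1 c.2.2) := by
  simp only [scanGoA, pvSuccs]
  split_ifs <;> simp

-- the worklist loop decides whether some pending configuration leads to acceptance
theorem pvLoop_any (ws : List (Int × List Char × List String)) :
    pvLoop ws = ws.any (fun c => scanGoA c.1 c.2.1 c.2.2) := by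
  induction ws using pvLoop.induct with
  | case1 => simp [pvLoop]
  | case2 c ws hacc =>
    obtain ⟨st, w, sk⟩ := c
    rw [pvLoop]
    simp only [if_pos hacc, List.any_cons]
    cases w with
    | nil =>
      rw [scanGoA_nil]
      simp [hacc]
    | cons ch w2 => simp [pvAccept] at hacc
  | case3 c ws hacc ih =>
    obtain ⟨st, w, sk⟩ := c
    rw [pvLoop]
    simp only [if_neg hacc]
    rw [ih]
    simp only [List.any_append, List.any_cons]
    cases w with
    | nil =>
      rw [scanGoA_nil]
      simp only [Bool.not_eq_true] at hacc
      simp [hacc, pvSuccs]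
    | cons ch w2 => rw [scanGoA_cons]

-- ===== VERDICT (by name: the statement is the Claim_ definition above) =====
theorem scan_word_spec : Claim_equal_scan_word := by
  intro state word stack _
  unfold Spec_scan_word scan_word scan_word_alt
  rw [pvLoop_any]
  simp
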